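-- pv_equiv track=rewrite | github.com/mrbartrns/algorithm-and-structure | programmers/lv4_review/p10.py | solution
-- ===== SOURCE A (Python) =====
-- def solution(n, path, order):
--     graph = [[] for _ in range(n)]
--     visited = [False] * n
--     prev_visit = [0] * n
--     next_visit = [0] * n
--     for a, b in path:
--         graph[a].append(b)
--         graph[b].append(a)
--
--     for a, b in order:
--         prev_visit[b] = a
--
--     if prev_visit[0]:
--         return False
--
--     visited[0] = True
--     dfs(0, visited=visited, prev_visit=prev_visit, next_visit=next_visit, graph=graph)
--     cnt = 0
--     for i in range(n):
--         if visited[i]: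
--             cnt += 1
--     return True if cnt == n else False
--
-- def dfs(node, **kwargs):
--     if not kwargs['visited'][kwargs['prev_visit'][node]]:
--         kwargs['next_visit'][kwargs['prev_visit'][node]] = node
--         return
--
--     kwargs['visited'][node] = True
--     if not kwargs['visited'][kwargs['next_visit'][node]]:
--         dfs(kwargs['next_visit'][node], **kwargs)
--
--     for i in kwargs['graph'][node]:
--         if not kwargs['visited'][i]:
--             dfs(i, **kwargs)
-- ===== SOURCE B (Python) =====
-- def solution(n, path, order):
--     graph = [[] for _ in range(n)]
--     prev_visit = [0] * n
--     for p in path: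
--         a, b = p
--         graph[a].append(b)
--         graph[b].append(a)
--     for o in order:
--         a, b = o
--         prev_visit[b] = a
--     if prev_visit[0]:
--         return False
--     visited = [False] * n
--     visited[0] = True
--     next_visit = [0] * n
--     stack = [c for c in reversed(graph[0])]
--     stack.append(next_visit[0])
--     while stack:
--         node = stack.pop()
--         if visited[node]:
--             continue
--         p = prev_visit[node]
--         if not visited[p]:
--             next_visit[p] = node
--             continue
--         visited[node] = True
--         for c in reversed(graph[node]):
--             stack.append(c)
--         stack.append(next_visit[node])
--     return visited.count(True) == n
-- ===== Notes on version B (the rewrite author's own statement) =====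
-- stated objective: alternative
-- what changed: The global recursive dfs (mutating state through **kwargs) is folded into solution as an iterative DFS over an explicit stack that replicates the deferral bookkeeping: visited/deferral guards are checked when a node is popped, which is exactly the moment the recursion would have entered it.
-- outside the precondition, e.g. on solution(2, [], [[5, 1]]): A returns False, B returns False
import Mathlib
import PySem

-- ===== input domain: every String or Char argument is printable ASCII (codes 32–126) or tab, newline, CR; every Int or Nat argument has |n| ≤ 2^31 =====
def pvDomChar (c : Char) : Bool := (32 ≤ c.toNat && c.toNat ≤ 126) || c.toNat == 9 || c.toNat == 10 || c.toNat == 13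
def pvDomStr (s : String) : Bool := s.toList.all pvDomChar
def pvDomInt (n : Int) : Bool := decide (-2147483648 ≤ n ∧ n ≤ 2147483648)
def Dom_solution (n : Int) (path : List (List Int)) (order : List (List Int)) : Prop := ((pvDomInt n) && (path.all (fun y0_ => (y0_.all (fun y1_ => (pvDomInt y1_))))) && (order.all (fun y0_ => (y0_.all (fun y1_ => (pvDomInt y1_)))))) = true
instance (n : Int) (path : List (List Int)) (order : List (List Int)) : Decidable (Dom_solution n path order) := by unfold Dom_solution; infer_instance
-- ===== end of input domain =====

-- B re-implements A's deferred DFS as an iterative explicit-stack loop (same deferral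
-- bookkeeping, different control flow); equivalence is about the return value.

-- shared low-level helper: `g[i].append(x)` with Python's negative-index wrap;
-- exact for in-range i (guaranteed by Pre_), a no-op out of range (unreachable under Pre_).
def appAt (g : List (List Int)) (i x : Int) : List (List Int) :=
  match PySem.List.pyIdx? g.length i with
  | some k => g.modify k (fun r => r ++ [x])
  | none => g

-- shared setup (identical Python code in A and B): adjacency lists and prev_visit
def buildGraph (nn : Nat) (path : List (List Int)) : List (List Int) :=
  path.foldl
    (fun g r =>
      appAt (appAt g (PySem.List.pyGetD r 0 0) (PySem.List.pyGetD r 1 0))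
            (PySem.List.pyGetD r 1 0) (PySem.List.pyGetD r 0 0))
    (List.replicate nn [])

def buildPrev (nn : Nat) (order : List (List Int)) : List Int :=
  order.foldl
    (fun pv r => PySem.List.pySetD pv (PySem.List.pyGetD r 1 0) (PySem.List.pyGetD r 0 0))
    (List.replicate nn 0)

-- termination helper for B's loop: flipping a really-False visited cell decreases the False count
theorem countP_set_true_lt (v : List Bool) (k : Nat) (h : v[k]? = some false) :
    (v.set k true).countP (· = false) < v.countP (· = false) := by
  induction v generalizing k with
  | nil => simp at h
  | cons x xs ih =>
    cases k with
    | zero => simp_all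
    | succ k =>
      simp only [List.getElem?_cons_succ] at h
      simp only [List.set_cons_succ, List.countP_cons]
      have := ih k h
      omega

theorem countFalse_pySetD_lt (v : List Bool) (i : Int)
    (h : PySem.List.pyGetD v i true = false) :
    (PySem.List.pySetD v i true).countP (· = false) < v.countP (· = false) := by
  cases hk : PySem.List.pyIdx? v.length i with
  | none => simp [PySem.List.pyGetD, PySem.List.pyGet?, hk] at h
  | some k =>
    cases hv : v[k]? with
    | none => simp [PySem.List.pyGetD, PySem.List.pyGet?, hk, hv] at h
    | some b =>
      simp [PySem.List.pyGetD, PySem.List.pyGet?, hk, hv] at h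
      subst h
      simpa [PySem.List.pySetD, PySem.List.pySet?, hk] using countP_set_true_lt v k hv

-- ===== PORT A =====
-- the recursive dfs of A; `fuel` bounds the recursion depth (the Python recursion depth is
-- at most (#unvisited)+2, so the fuel passed by `solution` is never exhausted);
-- dfsList is the transliteration of the `for i in graph[node]` loop of dfs
mutual
def dfsA (g : List (List Int)) (pv : List Int) (fuel : Nat) (node : Int)
    (st : List Bool × List Int) : List Bool × List Int :=
  match fuel with
  | 0 => st
  | fuel + 1 =>
    if PySem.List.pyGetD st.1 (PySem.List.pyGetD pv node 0) true = false then
      (st.1, PySem.List.pySetD st.2 (PySem.List.pyGetD pv node 0) node)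
    else
      let vis1 := PySem.List.pySetD st.1 node true
      let st1 := if PySem.List.pyGetD vis1 (PySem.List.pyGetD st.2 node 0) true = false
                 then dfsA g pv fuel (PySem.List.pyGetD st.2 node 0) (vis1, st.2)
                 else (vis1, st.2)
      dfsList g pv fuel (PySem.List.pyGetD g node []) st1
  termination_by (fuel, 0, 0)

def dfsList (g : List (List Int)) (pv : List Int) (fuel : Nat) (cs : List Int)
    (st : List Bool × List Int) : List Bool × List Int :=
  match cs with
  | [] => st
  | c :: cs' =>
    dfsList g pv fuel cs'
      (if PySem.List.pyGetD st.1 c true = false then dfsA g pv fuel c st else st)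
  termination_by (fuel, 1, cs.length)
end

def solution (n : Int) (path : List (List Int)) (order : List (List Int)) : Bool :=
  let nn := n.toNat
  let graph := buildGraph nn path
  let prevv := buildPrev nn order
  if PySem.List.pyGetD prevv 0 0 ≠ 0 then false
  else
    let vis := PySem.List.pySetD (List.replicate nn false) 0 true
    let st := dfsA graph prevv (nn + 2) 0 (vis, List.replicate nn 0)
    let cnt := (PySem.List.pyRange 0 n 1).foldl
      (fun c i => if PySem.List.pyGetD st.1 i false = true then c + 1 else c) (0 : Int)
    decide (cnt = n)

-- ===== PORT B =====
-- the while-loop of Source B; the stack is a list with its head as the top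
-- (Source B pushes reversed(graph[node]) then next_visit[node], so the popped order is
-- next_visit[node] :: graph[node] ++ rest)
def loopB (g : List (List Int)) (pv : List Int) (stack : List Int)
    (vis : List Bool) (nxt : List Int) : List Bool × List Int :=
  match stack with
  | [] => (vis, nxt)
  | node :: rest =>
    if PySem.List.pyGetD vis node true = true then
      loopB g pv rest vis nxt
    else if PySem.List.pyGetD vis (PySem.List.pyGetD pv node 0) true = false then
      loopB g pv rest vis (PySem.List.pySetD nxt (PySem.List.pyGetD pv node 0) node)
    else
      loopB g pv (PySem.List.pyGetD nxt node 0 :: (PySem.List.pyGetD g node [] ++ rest))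
        (PySem.List.pySetD vis node true) nxt
  termination_by (vis.countP (· = false), stack.length)
  decreasing_by
  · exact Prod.Lex.right _ (by simp)
  · exact Prod.Lex.right _ (by simp)
  · exact Prod.Lex.left _ _ (countFalse_pySetD_lt vis node (by simpa using ‹¬PySem.List.pyGetD vis node true = true›))

def solution_alt (n : Int) (path : List (List Int)) (order : List (List Int)) : Bool :=
  let nn := n.toNat
  let graph := buildGraph nn path
  let prevv := buildPrev nn order
  if PySem.List.pyGetD prevv 0 0 ≠ 0 then false
  else
    let vis := PySem.List.pySetD (List.replicate nn false) 0 true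
    let nxt := List.replicate nn (0 : Int)
    let st := loopB graph prevv
      (PySem.List.pyGetD nxt 0 0 :: PySem.List.pyGetD graph 0 []) vis nxt
    decide ((st.1.count true : Int) = n)

-- ===== PRECONDITION & SPEC =====
-- Pre_ excludes: n ≤ 0 and malformed pairs (A raises IndexError/ValueError), and pairs with an
-- endpoint outside [-n, n): such a path endpoint always raises IndexError, and such an order
-- prerequisite raises IndexError whenever the traversal consults it — it escapes the raise only
-- when the constrained node is unreachable (see claim cites; A and B agree there anyway).
def Pre_solution (n : Int) (path : List (List Int)) (order : List (List Int)) : Prop :=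
  1 ≤ n ∧ (∀ r ∈ path, r.length = 2 ∧ ∀ x ∈ r, -n ≤ x ∧ x < n)
        ∧ (∀ r ∈ order, r.length = 2 ∧ ∀ x ∈ r, -n ≤ x ∧ x < n)
instance (n : Int) (path : List (List Int)) (order : List (List Int)) : Decidable (Pre_solution n path order) := by unfold Pre_solution; infer_instance

def pvWitness_solution : Int × List (List Int) × List (List Int) :=
  (3, [[0, 1], [1, 2]], [[2, 1]])

def Spec_solution (n : Int) (path : List (List Int)) (order : List (List Int)) (out : Bool) : Prop := out = solution_alt n path order
instance (n : Int) (path : List (List Int)) (order : List (List Int)) (out : Bool) : Decidable (Spec_solution n path order out) := by unfold Spec_solution; infer_instance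

-- ===== CLAIM (what is proved, stated in full; the proofs are below) =====
def Claim_equal_solution : Prop := ∀ (n : Int) (path : List (List Int)) (order : List (List Int)), Dom_solution n path order → Pre_solution n path order → Spec_solution n path order (solution n path order)

-- ===== LEMMAS AND PROOFS =====

theorem length_pySetD' {α : Type} (xs : List α) (i : Int) (v : α) :
    (PySem.List.pySetD xs i v).length = xs.length := by
  cases hk : PySem.List.pyIdx? xs.length i <;>
    simp [PySem.List.pySetD, PySem.List.pySet?, hk]

theorem dfs_len (g : List (List Int)) (pv : List Int) :
    ∀ fuel : Nat,
      (∀ node st, ((dfsA g pv fuel node st).1.length = st.1.length)) ∧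
      (∀ cs st, ((dfsList g pv fuel cs st).1.length = st.1.length)) := by
  intro fuel
  induction fuel with
  | zero =>
    have hA : ∀ node st, ((dfsA g pv 0 node st).1.length = st.1.length) := by
      intro node st; rw [dfsA]
    refine ⟨hA, ?_⟩
    intro cs
    induction cs with
    | nil => intro st; rw [dfsList]
    | cons c cs ih =>
      intro st
      rw [dfsList, ih]
      split
      · rw [hA]
      · rfl
  | succ f ihP =>
    have hA : ∀ node st, ((dfsA g pv (f + 1) node st).1.length = st.1.length) := by
      intro node st
      rw [dfsA]
      split
      · rfl
      · dsimp only
        rw [ihP.2]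
        split
        · rw [ihP.1]; exact length_pySetD' _ _ _
        · exact length_pySetD' _ _ _
    refine ⟨hA, ?_⟩
    intro cs
    induction cs with
    | nil => intro st; rw [dfsList]
    | cons c cs ih =>
      intro st
      rw [dfsList, ih]
      split
      · rw [hA]
      · rfl

theorem countP_set_true_le (v : List Bool) (k : Nat) :
    (v.set k true).countP (· = false) ≤ v.countP (· = false) := by
  induction v generalizing k with
  | nil => simp
  | cons x xs ih =>
    cases k with
    | zero => cases x <;> simp
    | succ k =>
      simp only [List.set_cons_succ, List.countP_cons]
      have := ih k
      omega

theorem countFalse_pySetD_le (v : List Bool) (i : Int) :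
    (PySem.List.pySetD v i true).countP (· = false) ≤ v.countP (· = false) := by
  cases hk : PySem.List.pyIdx? v.length i with
  | none => simp [PySem.List.pySetD, PySem.List.pySet?, hk]
  | some k =>
    simpa [PySem.List.pySetD, PySem.List.pySet?, hk] using countP_set_true_le v k

theorem dfs_countFalse_le (g : List (List Int)) (pv : List Int) :
    ∀ fuel : Nat,
      (∀ node st, ((dfsA g pv fuel node st).1.countP (· = false) ≤ st.1.countP (· = false))) ∧
      (∀ cs st, ((dfsList g pv fuel cs st).1.countP (· = false) ≤ st.1.countP (· = false))) := by
  intro fuel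
  induction fuel with
  | zero =>
    have hA : ∀ node st, ((dfsA g pv 0 node st).1.countP (· = false) ≤ st.1.countP (· = false)) := by
      intro node st; rw [dfsA]
    refine ⟨hA, ?_⟩
    intro cs
    induction cs with
    | nil => intro st; rw [dfsList]
    | cons c cs ih =>
      intro st
      rw [dfsList]
      refine le_trans (ih _) ?_
      split
      · exact hA _ _
      · exact le_refl _
  | succ f ihP =>
    have hA : ∀ node st, ((dfsA g pv (f + 1) node st).1.countP (· = false) ≤ st.1.countP (· = false)) := by
      intro node st
      rw [dfsA]
      split
      · exact le_refl _
      · dsimp only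
        refine le_trans (ihP.2 _ _) ?_
        split
        · exact le_trans (ihP.1 _ _) (countFalse_pySetD_le _ _)
        · exact countFalse_pySetD_le _ _
    refine ⟨hA, ?_⟩
    intro cs
    induction cs with
    | nil => intro st; rw [dfsList]
    | cons c cs ih =>
      intro st
      rw [dfsList]
      refine le_trans (ih _) ?_
      split
      · exact hA _ _
      · exact le_refl _

theorem loopB_nil (g : List (List Int)) (pv : List Int) (vis : List Bool) (nxt : List Int) :
    loopB g pv [] vis nxt = (vis, nxt) := by
  rw [loopB]

theorem loopB_cons (g : List (List Int)) (pv : List Int) (node : Int) (rest : List Int)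
    (vis : List Bool) (nxt : List Int) :
    loopB g pv (node :: rest) vis nxt =
      if PySem.List.pyGetD vis node true = true then
        loopB g pv rest vis nxt
      else if PySem.List.pyGetD vis (PySem.List.pyGetD pv node 0) true = false then
        loopB g pv rest vis (PySem.List.pySetD nxt (PySem.List.pyGetD pv node 0) node)
      else
        loopB g pv (PySem.List.pyGetD nxt node 0 :: (PySem.List.pyGetD g node [] ++ rest))
          (PySem.List.pySetD vis node true) nxt := by
  rw [loopB]

theorem countP_false_pos (v : List Bool) (k : Nat) (hk : k < v.length)
    (hval : v[k] = false) : 1 ≤ v.countP (· = false) := by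
  induction v generalizing k with
  | nil => simp at hk
  | cons x xs ih =>
    cases k with
    | zero => simp_all
    | succ k =>
      simp only [List.getElem_cons_succ] at hval
      simp only [List.countP_cons]
      have := ih k (by simpa using hk) hval
      omega

theorem one_le_countFalse (v : List Bool) (i : Int)
    (h : PySem.List.pyGetD v i true = false) : 1 ≤ v.countP (· = false) := by
  cases hk : PySem.List.pyIdx? v.length i with
  | none => simp [PySem.List.pyGetD, PySem.List.pyGet?, hk] at h
  | some k =>
    cases hv : v[k]? with
    | none => simp [PySem.List.pyGetD, PySem.List.pyGet?, hk, hv] at h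
    | some b =>
      simp [PySem.List.pyGetD, PySem.List.pyGet?, hk, hv] at h
      subst h
      obtain ⟨hk2, hval⟩ := List.getElem?_eq_some_iff.mp hv
      exact countP_false_pos v k hk2 hval

theorem sim (g : List (List Int)) (pv : List Int) :
    ∀ fuel : Nat,
      (∀ node vis nxt rest, vis.countP (· = false) ≤ fuel →
        PySem.List.pyGetD vis node true = false →
        loopB g pv (node :: rest) vis nxt =
          loopB g pv rest (dfsA g pv fuel node (vis, nxt)).1 (dfsA g pv fuel node (vis, nxt)).2) ∧
      (∀ cs vis nxt rest, vis.countP (· = false) ≤ fuel →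
        loopB g pv (cs ++ rest) vis nxt =
          loopB g pv rest (dfsList g pv fuel cs (vis, nxt)).1 (dfsList g pv fuel cs (vis, nxt)).2) := by
  intro fuel
  induction fuel with
  | zero =>
    have hA : ∀ node vis nxt rest, vis.countP (· = false) ≤ 0 →
        PySem.List.pyGetD vis node true = false →
        loopB g pv (node :: rest) vis nxt =
          loopB g pv rest (dfsA g pv 0 node (vis, nxt)).1 (dfsA g pv 0 node (vis, nxt)).2 := by
      intro node vis nxt rest hf hg
      have := one_le_countFalse vis node hg
      omega
    refine ⟨hA, ?_⟩
    intro cs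
    induction cs with
    | nil =>
      intro vis nxt rest hf
      rw [dfsList, List.nil_append]
    | cons c cs ih =>
      intro vis nxt rest hf
      rw [dfsList, List.cons_append]
      by_cases hc : PySem.List.pyGetD vis c true = false
      · have := one_le_countFalse vis c hc; omega
      · rw [if_neg hc, loopB_cons, if_pos (by simpa using hc)]
        exact ih vis nxt rest hf
  | succ f ihP =>
    have hA : ∀ node vis nxt rest, vis.countP (· = false) ≤ f + 1 →
        PySem.List.pyGetD vis node true = false →
        loopB g pv (node :: rest) vis nxt =
          loopB g pv rest (dfsA g pv (f + 1) node (vis, nxt)).1 (dfsA g pv (f + 1) node (vis, nxt)).2 := by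
      intro node vis nxt rest hf hg
      rw [dfsA, loopB_cons, if_neg (by simp [hg])]
      by_cases hd : PySem.List.pyGetD vis (PySem.List.pyGetD pv node 0) true = false
      · rw [if_pos hd, if_pos hd]
      · rw [if_neg hd, if_neg hd]
        dsimp only
        have hcf1 : (PySem.List.pySetD vis node true).countP (· = false) ≤ f := by
          have := countFalse_pySetD_lt vis node hg
          omega
        by_cases ht : PySem.List.pyGetD (PySem.List.pySetD vis node true)
            (PySem.List.pyGetD nxt node 0) true = false
        · rw [if_pos ht]
          rw [ihP.1 (PySem.List.pyGetD nxt node 0) (PySem.List.pySetD vis node true) nxt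
                (PySem.List.pyGetD g node [] ++ rest) hcf1 ht]
          have hcf2 : ((dfsA g pv f (PySem.List.pyGetD nxt node 0)
              (PySem.List.pySetD vis node true, nxt)).1).countP (· = false) ≤ f :=
            le_trans ((dfs_countFalse_le g pv f).1 _ _) hcf1
          rw [ihP.2 (PySem.List.pyGetD g node [])
                (dfsA g pv f (PySem.List.pyGetD nxt node 0) (PySem.List.pySetD vis node true, nxt)).1
                (dfsA g pv f (PySem.List.pyGetD nxt node 0) (PySem.List.pySetD vis node true, nxt)).2
                rest hcf2]
        · rw [if_neg ht, loopB_cons, if_pos (by simpa using ht)]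
          exact ihP.2 (PySem.List.pyGetD g node []) (PySem.List.pySetD vis node true) nxt rest hcf1
    refine ⟨hA, ?_⟩
    intro cs
    induction cs with
    | nil =>
      intro vis nxt rest hf
      rw [dfsList, List.nil_append]
    | cons c cs ih =>
      intro vis nxt rest hf
      rw [dfsList, List.cons_append]
      by_cases hc : PySem.List.pyGetD vis c true = false
      · rw [if_pos hc, hA c vis nxt (cs ++ rest) hf hc]
        have hcf : ((dfsA g pv (f + 1) c (vis, nxt)).1).countP (· = false) ≤ f + 1 :=
          le_trans ((dfs_countFalse_le g pv (f + 1)).1 _ _) hf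
        exact ih (dfsA g pv (f + 1) c (vis, nxt)).1 (dfsA g pv (f + 1) c (vis, nxt)).2 rest hcf
      · rw [if_neg hc, loopB_cons, if_pos (by simpa using hc)]
        exact ih vis nxt rest hf

theorem solution_spec_aux (n : Int) (path : List (List Int)) (order : List (List Int))
    (hn : 1 ≤ n) : solution n path order = solution_alt n path order := by
  unfold solution solution_alt
  dsimp only
  by_cases h0 : PySem.List.pyGetD (buildPrev n.toNat order) 0 0 ≠ 0
  · rw [if_pos h0, if_pos h0]
  · rw [if_neg h0, if_neg h0]
    rw [not_not] at h0
    have hnn : 1 ≤ n.toNat := by omega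
    have hlenV0 : (PySem.List.pySetD (List.replicate n.toNat false) 0 true).length = n.toNat := by
      rw [length_pySetD', List.length_replicate]
    have hidx0 : PySem.List.pyIdx? n.toNat 0 = some 0 := by
      unfold PySem.List.pyIdx?
      rw [if_pos le_rfl, if_pos (by exact_mod_cast hnn)]
      rfl
    have hV0def : PySem.List.pySetD (List.replicate n.toNat false) 0 true
        = (List.replicate n.toNat false).set 0 true := by
      unfold PySem.List.pySetD PySem.List.pySet?
      rw [List.length_replicate, hidx0]
      rfl
    have hget0 : PySem.List.pyGetD (PySem.List.pySetD (List.replicate n.toNat false) 0 true) 0 true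
        = true := by
      unfold PySem.List.pyGetD PySem.List.pyGet?
      rw [hlenV0, hidx0, hV0def]
      simp only [Option.bind_some]
      rw [List.getElem?_set_self (by simp only [List.length_replicate]; omega)]
      rfl
    have hsetV0 : PySem.List.pySetD (PySem.List.pySetD (List.replicate n.toNat false) 0 true) 0 true
        = PySem.List.pySetD (List.replicate n.toNat false) 0 true := by
      conv_lhs => rw [hV0def]
      unfold PySem.List.pySetD PySem.List.pySet?
      rw [List.length_set, List.length_replicate, hidx0]
      simp [List.set_set]
    have hN0 : PySem.List.pyGetD (List.replicate n.toNat (0 : Int)) 0 0 = 0 := by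
      unfold PySem.List.pyGetD PySem.List.pyGet?
      rw [List.length_replicate, hidx0]
      simp only [Option.bind_some, List.getElem?_replicate]
      split <;> rfl
    have hAeq : dfsA (buildGraph n.toNat path) (buildPrev n.toNat order) (n.toNat + 2) 0
          (PySem.List.pySetD (List.replicate n.toNat false) 0 true, List.replicate n.toNat (0 : Int))
        = dfsList (buildGraph n.toNat path) (buildPrev n.toNat order) (n.toNat + 1)
            (PySem.List.pyGetD (buildGraph n.toNat path) 0 [])
            (PySem.List.pySetD (List.replicate n.toNat false) 0 true,
             List.replicate n.toNat (0 : Int)) := by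
      rw [show n.toNat + 2 = (n.toNat + 1) + 1 from rfl, dfsA]
      rw [h0, if_neg (by simp [hget0])]
      dsimp only
      rw [hsetV0, hN0, if_neg (by simp [hget0])]
    have hsim := (sim (buildGraph n.toNat path) (buildPrev n.toNat order) (n.toNat + 1)).2
      (PySem.List.pyGetD (buildGraph n.toNat path) 0 [])
      (PySem.List.pySetD (List.replicate n.toNat false) 0 true)
      (List.replicate n.toNat (0 : Int)) []
      (by
        have h1 : (PySem.List.pySetD (List.replicate n.toNat false) 0 true).countP (· = false)
            ≤ (PySem.List.pySetD (List.replicate n.toNat false) 0 true).length :=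
          List.countP_le_length
        omega)
    rw [List.append_nil, loopB_nil] at hsim
    have hB : loopB (buildGraph n.toNat path) (buildPrev n.toNat order)
          (PySem.List.pyGetD (List.replicate n.toNat (0 : Int)) 0 0
            :: PySem.List.pyGetD (buildGraph n.toNat path) 0 [])
          (PySem.List.pySetD (List.replicate n.toNat false) 0 true)
          (List.replicate n.toNat (0 : Int))
        = dfsA (buildGraph n.toNat path) (buildPrev n.toNat order) (n.toNat + 2) 0
          (PySem.List.pySetD (List.replicate n.toNat false) 0 true,
           List.replicate n.toNat (0 : Int)) := by
      rw [hN0, loopB_cons, if_pos hget0, hsim, hAeq]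
    rw [hB]
    have hlenSt : (dfsA (buildGraph n.toNat path) (buildPrev n.toNat order) (n.toNat + 2) 0
        (PySem.List.pySetD (List.replicate n.toNat false) 0 true,
         List.replicate n.toNat (0 : Int))).1.length = n.toNat := by
      rw [(dfs_len _ _ _).1]
      exact hlenV0
    have hcount : ∀ v : List Bool, v.length = n.toNat →
        (PySem.List.pyRange 0 n 1).foldl
          (fun c i => if PySem.List.pyGetD v i false = true then c + 1 else c) (0 : Int)
        = (v.count true : Int) := by
      intro v hv
      have hn' : ((v.length : Int)) = n := by omega
      rw [← hn',
          PySem.List.foldl_pyRange_zero_pyGetD' v false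
            (fun acc b => if b = true then acc + 1 else acc) 0]
      simp [PySem.List.foldl_ite_add_one, List.count_eq_countP]
    rw [hcount _ hlenSt]

-- ===== VERDICT (by name: the statement is the Claim_ definition above) =====
theorem solution_spec : Claim_equal_solution := by
  intro n path order _ hpre
  exact solution_spec_aux n path order hpre.1
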